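-- pv_equiv track=rewrite | github.com/Hiraoka-Group/rsu-project | rsuanalyzer/calc_rsu.py | ring_to_chains
-- ===== SOURCE A (Python) =====
-- def ring_to_chains(conf_id_of_ring: str) -> list[str]:
--     """
--     Convert the conformation ID of a ring to the conformation IDs of
--     the chains.
--
--     Args:
--     - conf_id_of_ring (str): The conformation ID of the ring.
--       This should contain the same number of connection types as the
--       number of ligands in the ring. For example, for a 2-membered ring,
--       it would be "RR(FF)RL(FF)". With and without brackets are both
--       acceptable.
--
--     Returns:
--     - list[str]: The conformation IDs of the chains.
--
--     Examples:
--     >>> ring_to_chains("RR(FF)RL(FF)")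
--     ['RRFFRL', 'RLFFRR']
--     >>> ring_to_chains("RR(FF)RL(FF)RR(BF)")
--     ['RRFFRLFFRR', 'RRBFRRFFRL', 'RLFFRRBFRR']
--     """
--     conf_id_of_ring = conf_id_of_ring.replace("(", "").replace(")", "")
--     chain_length = len(conf_id_of_ring) // 4
--     chains = []
--     for _ in range(chain_length):
--         conf_id = conf_id_of_ring[:-2]
--         conf_id_of_ring = conf_id_of_ring[-4:] + conf_id_of_ring[:-4]
--         chains.append(conf_id)
--     return chains
-- ===== SOURCE B (Python) =====
-- def ring_to_chains(conf_id_of_ring: str) -> list[str]: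
--     s = conf_id_of_ring.replace("(", "").replace(")", "")
--     L = len(s)
--     s2 = s + s
--     return [s2[L - 4 * i : 2 * L - 4 * i - 2] for i in range(L // 4)]
-- ===== Notes on version B (the rewrite author's own statement) =====
-- stated objective: simpler
-- what changed: Replaces the loop that mutates a rotating buffer (re-slicing and re-concatenating the whole string each iteration) by a single comprehension that reads each chain directly out of the doubled string s+s by index arithmetic.
import Mathlib
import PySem

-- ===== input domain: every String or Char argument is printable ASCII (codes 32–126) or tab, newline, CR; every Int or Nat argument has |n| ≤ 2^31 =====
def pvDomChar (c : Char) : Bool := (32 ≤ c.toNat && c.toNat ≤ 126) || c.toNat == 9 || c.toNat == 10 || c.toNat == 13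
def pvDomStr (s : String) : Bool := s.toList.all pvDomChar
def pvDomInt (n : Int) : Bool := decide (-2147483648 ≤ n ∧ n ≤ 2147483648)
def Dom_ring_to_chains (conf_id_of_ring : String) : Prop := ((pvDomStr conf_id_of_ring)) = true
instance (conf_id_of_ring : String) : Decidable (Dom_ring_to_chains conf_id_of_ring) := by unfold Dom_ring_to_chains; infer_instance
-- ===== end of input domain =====

-- B replaces A's loop over a mutated rotating buffer with a comprehension slicing each
-- chain directly out of the doubled string (objective: simpler; same return values).

-- ===== PORT A =====
-- the loop `for _ in range(chain_length): conf_id = s[:-2]; s = s[-4:] + s[:-4]; chains.append(conf_id)`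
def ringLoopA (k : Nat) (s : List Char) (chains : List String) : List String :=
  match k with
  | 0 => chains
  | k + 1 =>
    ringLoopA k (PySem.List.slice s (some (-4)) none ++ PySem.List.slice s none (some (-4)))
      (chains ++ [String.ofList (PySem.List.slice s none (some (-2)))])

def ring_to_chains (conf_id_of_ring : String) : List String :=
  let s := PySem.Chars.replace (PySem.Chars.replace conf_id_of_ring.toList ['('] []) [')'] []
  let chain_length := PySem.Int.floordiv (s.length : Int) 4
  ringLoopA chain_length.toNat s []

-- ===== PORT B =====
def ring_to_chains_alt (conf_id_of_ring : String) : List String :=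
  let s := PySem.Chars.replace (PySem.Chars.replace conf_id_of_ring.toList ['('] []) [')'] []
  let L : Int := (s.length : Int)
  let s2 := s ++ s
  (PySem.List.pyRange 0 (PySem.Int.floordiv L 4) 1).map
    (fun i => String.ofList (PySem.List.slice s2 (some (L - 4 * i)) (some (2 * L - 4 * i - 2))))

-- ===== PRECONDITION & SPEC =====
def Spec_ring_to_chains (conf_id_of_ring : String) (out : List String) : Prop := out = ring_to_chains_alt conf_id_of_ring
instance (conf_id_of_ring : String) (out : List String) : Decidable (Spec_ring_to_chains conf_id_of_ring out) := by unfold Spec_ring_to_chains; infer_instance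

-- ===== CLAIM (what is proved, stated in full; the proofs are below) =====
def Claim_equal_ring_to_chains : Prop := ∀ (conf_id_of_ring : String), Dom_ring_to_chains conf_id_of_ring → Spec_ring_to_chains conf_id_of_ring (ring_to_chains conf_id_of_ring)

-- ===== LEMMAS AND PROOFS =====

/-- The i-th chain of the ring with (stripped) ID `t`, read out of the doubled list `t ++ t`. -/
def chainAt (t : List Char) (i : Nat) : List Char :=
  ((t ++ t).drop (t.length - 4 * i)).take (t.length - 2)

theorem ringLoopA_acc (k : Nat) (s : List Char) (acc : List String) :
    ringLoopA k s acc = acc ++ ringLoopA k s [] := by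
  induction k generalizing s acc with
  | zero => simp [ringLoopA]
  | succ k ih =>
    rw [ringLoopA, ringLoopA, ih, ih (acc := [] ++ _)]
    simp

theorem chain_shift_core (T D : List Char) (i : Nat) (hD : D.length = 4) (hi : 4 * i ≤ T.length) :
    chainAt (D ++ T) i = chainAt (T ++ D) (i + 1) := by
  unfold chainAt
  have hL1 : (D ++ T).length = T.length + 4 := by simp [hD]; omega
  have hL2 : (T ++ D).length = T.length + 4 := by simp [hD]
  rw [hL1, hL2]
  have e1 : ((D ++ T) ++ (D ++ T)).drop (T.length + 4 - 4 * i)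
      = T.drop (T.length - 4 * i) ++ (D ++ T) := by
    rw [List.drop_append, List.drop_append,
        List.drop_eq_nil_of_le (by omega : D.length ≤ T.length + 4 - 4 * i)]
    rw [show T.length + 4 - 4 * i - D.length = T.length - 4 * i by rw [hD]; omega]
    rw [show T.length + 4 - 4 * i - (D ++ T).length = 0 by rw [hL1]; omega, List.drop_zero]
    simp
  have e2 : ((T ++ D) ++ (T ++ D)).drop (T.length + 4 - 4 * (i + 1))
      = T.drop (T.length - 4 * i) ++ (D ++ (T ++ D)) := by
    rw [List.drop_append, List.drop_append]
    rw [show T.length + 4 - 4 * (i + 1) = T.length - 4 * i by omega]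
    rw [show T.length - 4 * i - T.length = 0 by omega]
    rw [show T.length - 4 * i - (T ++ D).length = 0 by rw [hL2]; omega]
    simp
  rw [e1, e2]
  have hX : (T.drop (T.length - 4 * i)).length = 4 * i := by simp; omega
  rw [List.take_append, List.take_append (l₁ := T.drop (T.length - 4 * i)), hX]
  congr 1
  rw [List.take_append, List.take_append (l₁ := D), hD]
  congr 1
  exact (List.take_append_of_le_length (by omega)).symm

theorem chain_shift (t : List Char) (i : Nat) (h : 4 * i + 4 ≤ t.length) :
    chainAt (t.drop (t.length - 4) ++ t.take (t.length - 4)) i = chainAt t (i + 1) := by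
  have := chain_shift_core (t.take (t.length - 4)) (t.drop (t.length - 4)) i
    (by simp; omega) (by simp; omega)
  rwa [List.take_append_drop] at this

theorem chainAt_zero (t : List Char) : chainAt t 0 = t.take (t.length - 2) := by
  unfold chainAt
  rw [Nat.mul_zero, Nat.sub_zero, List.drop_append]
  simp

theorem ringLoopA_eq_map (k : Nat) (t : List Char) (h : 4 * k ≤ t.length) :
    ringLoopA k t [] = (List.range k).map (fun i => String.ofList (chainAt t i)) := by
  induction k generalizing t with
  | zero => simp [ringLoopA]
  | succ k ih =>
    have h4 : 4 ≤ t.length := by omega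
    rw [ringLoopA, ringLoopA_acc, PySem.List.slice_from_neg_ofNat t 4 (by omega),
        PySem.List.slice_to_neg_ofNat t 4 (by omega)]
    have hlen : (t.drop (t.length - 4) ++ t.take (t.length - 4)).length = t.length := by
      simp
    rw [ih _ (by omega : 4 * k ≤ (t.drop (t.length - 4) ++ t.take (t.length - 4)).length)]
    rw [List.range_succ_eq_map, List.map_cons, List.map_map]
    refine congrArg₂ List.cons ?_ ?_
    · rw [PySem.List.slice_to_neg_ofNat t 2 (by omega), chainAt_zero]
    · refine List.map_congr_left (fun i hi => ?_)
      have hik : i < k := List.mem_range.mp hi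
      simp only [Function.comp]
      rw [chain_shift t i (by omega)]

theorem ring_to_chains_spec : Claim_equal_ring_to_chains := by
  intro conf _
  unfold Spec_ring_to_chains
  simp only [ring_to_chains, ring_to_chains_alt]
  set s := PySem.Chars.replace (PySem.Chars.replace conf.toList ['('] []) [')'] [] with hs
  have hfd : PySem.Int.floordiv (s.length : Int) 4 = ((s.length / 4 : Nat) : Int) := by
    exact_mod_cast PySem.Int.floordiv_natCast s.length 4
  have h4 : 4 * (s.length / 4) ≤ s.length := by omega
  rw [hfd]
  simp only [Int.toNat_natCast]
  rw [ringLoopA_eq_map (s.length / 4) s h4]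
  rw [PySem.List.pyRange_one]
  simp only [sub_zero, Int.toNat_natCast, List.map_map]
  refine List.map_congr_left (fun i hi => ?_)
  have hik : i < s.length / 4 := List.mem_range.mp hi
  have hle : 4 * i + 4 ≤ s.length := by omega
  simp only [Function.comp, zero_add]
  congr 1
  have ha : (s.length : Int) - 4 * (i : Int) = ((s.length - 4 * i : Nat) : Int) := by omega
  have hb : 2 * (s.length : Int) - 4 * (i : Int) - 2 = ((2 * s.length - 4 * i - 2 : Nat) : Int) := by omega
  rw [ha, hb, PySem.List.slice_natCast]
  unfold chainAt
  congr 1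
  omega
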